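-- pv_equiv track=rewrite | github.com/johnzhoudev/leetcode-practice | meta/cafeteria.py | solve
-- ===== SOURCE A (Python) =====
-- def solve(n, k, m, s) -> int:
--   newDiners = 0
--   seatsTaken = set(s)
--
--   def isValidRange(start, end):
--     for i in range(max(start, 1), min(end + 1, n + 1)):
--       if i in seatsTaken: return False
--     return True
--
--   for i in range(1, n + 1):
--     if isValidRange(i - k, i + k):
--       seatsTaken.add(i)
--       newDiners += 1
--
--   return newDiners
-- ===== SOURCE B (Python) =====
-- def solve(n, k, m, s) -> int:
--     # Sort the distinct occupied seats inside [1, n]; count placeable diners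
--     # per gap with an arithmetic formula (closed form per gap, O(m log m)).
--     occ = sorted({x for x in s if 1 <= x <= n})
--     total = 0
--     prev = -k  # virtual occupied seat so the first real seat allowed is 1
--     for b in occ + [n + k + 1]:  # virtual occupied seat just past the end
--         total += max(0, (b - prev - k - 1) // (k + 1))
--         prev = b
--     return total
-- ===== Notes on version B (the rewrite author's own statement) =====
-- stated objective: faster
-- what changed: Replaced the per-seat window scan over a growing seat set by sorting the distinct occupied seats in [1,n] once and computing the number of placeable diners in each gap with a closed-form floor-division formula.
-- outside the precondition, e.g. on solve(3, -1, 1, [2]): A returns 3, B raises ZeroDivisionError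
import Mathlib
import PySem

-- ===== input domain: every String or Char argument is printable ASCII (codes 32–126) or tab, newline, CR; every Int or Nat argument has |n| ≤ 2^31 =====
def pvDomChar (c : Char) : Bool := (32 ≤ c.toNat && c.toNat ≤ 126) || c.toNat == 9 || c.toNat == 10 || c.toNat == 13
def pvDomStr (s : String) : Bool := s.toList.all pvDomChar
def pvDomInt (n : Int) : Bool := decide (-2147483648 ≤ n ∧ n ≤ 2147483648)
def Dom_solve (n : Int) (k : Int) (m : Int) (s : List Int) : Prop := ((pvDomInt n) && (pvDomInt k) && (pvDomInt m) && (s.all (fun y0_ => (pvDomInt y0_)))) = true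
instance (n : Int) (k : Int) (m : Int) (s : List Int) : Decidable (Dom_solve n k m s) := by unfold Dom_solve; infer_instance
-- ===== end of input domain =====

-- B replaces A's per-seat window scan by sorting the distinct occupied seats once
-- and counting placeable diners per gap with a closed-form floor-division (faster).


-- ===== PORT A =====
def solveIsValidRange (n : Int) (seatsTaken : PySem.Set Int) (start : Int) (e : Int) : Bool :=
  (PySem.List.pyRange (max start 1) (min (e + 1) (n + 1)) 1).all
    (fun i => !(PySem.Set.contains seatsTaken i))

def solve (n : Int) (k : Int) (m : Int) (s : List Int) : Int :=
  ((PySem.List.pyRange 1 (n + 1) 1).foldl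
    (fun st i =>
      if solveIsValidRange n st.2 (i - k) (i + k) then (st.1 + 1, PySem.Set.add st.2 i) else st)
    ((0 : Int), PySem.Set.ofList s)).1

-- ===== PORT B =====
def solve_alt (n : Int) (k : Int) (m : Int) (s : List Int) : Int :=
  let occ := PySem.List.sorted
    (PySem.Set.ofList (s.filter (fun x => decide (1 ≤ x) && decide (x ≤ n)))) (fun x => x) false
  ((occ ++ [n + k + 1]).foldl
    (fun st b => (st.1 + max 0 (PySem.Int.floordiv (b - st.2 - k - 1) (k + 1)), b))
    ((0 : Int), -k)).1

-- ===== PRECONDITION & SPEC =====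
-- Pre_ excludes negative spacing k, outside the task's natural domain: there A
-- vacuously seats every position (even occupied ones) while B's gap arithmetic
-- would divide by k + 1 (ZeroDivisionError for k = -1).
def Pre_solve (n : Int) (k : Int) (m : Int) (s : List Int) : Prop := 0 ≤ k
instance (n : Int) (k : Int) (m : Int) (s : List Int) : Decidable (Pre_solve n k m s) := by unfold Pre_solve; infer_instance

def pvWitness_solve : Int × Int × Int × List Int := (3, 1, 1, [2])

def Spec_solve (n : Int) (k : Int) (m : Int) (s : List Int) (out : Int) : Prop := out = solve_alt n k m s
instance (n : Int) (k : Int) (m : Int) (s : List Int) (out : Int) : Decidable (Spec_solve n k m s out) := by unfold Spec_solve; infer_instance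

-- ===== CLAIM (what is proved, stated in full; the proofs are below) =====
def Claim_equal_solve : Prop := ∀ (n : Int) (k : Int) (m : Int) (s : List Int), Dom_solve n k m s → Pre_solve n k m s → Spec_solve n k m s (solve n k m s)

-- ===== LEMMAS AND PROOFS =====

-- The shared intermediate greedy: scan `fuel` consecutive seats starting at `i`,
-- state (last placed seat, count); place at i iff `free i` and i - last > k.
def gA (k : Int) (free : Int → Bool) : Nat → Int → Int × Int → Int × Int
  | 0, _, st => st
  | f + 1, i, st =>
      if free i && decide (k < i - st.1) then gA k free f (i + 1) (i, st.2 + 1)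
      else gA k free f (i + 1) st

theorem gA_add (k : Int) (free : Int → Bool) (f₁ f₂ : Nat) (c : Int) (st : Int × Int) :
    gA k free (f₁ + f₂) c st = gA k free f₂ (c + (f₁ : Int)) (gA k free f₁ c st) := by
  induction f₁ generalizing c st with
  | zero => simp [gA]
  | succ f ih =>
    have : f + 1 + f₂ = (f + f₂) + 1 := by omega
    rw [this]
    simp only [gA]
    split
    · rw [ih]; congr 1; push_cast; ring
    · rw [ih]; congr 1; push_cast; ring

theorem gA_const (k : Int) (free : Int → Bool) (f : Nat) (c : Int) (st : Int × Int)
    (h : ∀ i, c ≤ i → i < c + (f : Int) → free i = false) :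
    gA k free f c st = st := by
  induction f generalizing c st with
  | zero => rfl
  | succ f ih =>
    have hc : free c = false := h c le_rfl (by push_cast; omega)
    simp only [gA, hc, Bool.false_and, if_neg Bool.false_ne_true]
    exact ih (c + 1) st (fun i h1 h2 => h i (by omega) (by push_cast at h2 ⊢; omega))

theorem gA_near (k : Int) (free : Int → Bool) (f : Nat) (c l t : Int)
    (h : ∀ i, c ≤ i → i < c + (f : Int) → i - l ≤ k) :
    gA k free f c (l, t) = (l, t) := by
  induction f generalizing c with
  | zero => rfl
  | succ f ih =>
    have h1 : ¬ (k < c - l) := by have := h c le_rfl (by push_cast; omega); omega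
    simp only [gA]
    rw [if_neg (by simp [h1])]
    exact ih (c + 1) (fun i h1 h2 => h i (by omega) (by push_cast at h2 ⊢; omega))

theorem gA_freeRun (k : Int) (hk : 0 ≤ k) (free : Int → Bool) (f : Nat) (c l t : Int)
    (hfree : ∀ i, c ≤ i → i < c + (f : Int) → free i = true)
    (hl : l ≤ c - 1) (hstart : l + k + 1 ≤ c) :
    gA k free f c (l, t) =
      if c + (f : Int) - 1 < c then (l, t)
      else (c + ((f : Int) - 1) / (k + 1) * (k + 1), t + ((f : Int) - 1) / (k + 1) + 1) := by
  induction f using Nat.strong_induction_on generalizing c l t with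
  | _ f ih =>
    match f, hfree with
    | 0, _ => simp [gA]
    | (f + 1), hfree =>
      have hc : free c = true := hfree c le_rfl (by push_cast; omega)
      have hplace : (free c && decide (k < c - l)) = true := by
        simp [hc]; omega
      simp only [gA, hplace, if_true]
      rw [if_neg (by push_cast; omega)]
      push_cast
      rcases lt_or_ge (f : Int) (k + 1) with hf | hf
      · rw [gA_near k free f (c+1) c (t+1) (fun i h1 h2 => by omega)]
        have : ((f : Int) + 1 - 1) / (k + 1) = 0 :=
          Int.ediv_eq_zero_of_lt (by omega) (by omega)
        rw [this]; simp
      · -- split: k seats [c+1, c+k] blocked by the seat just placed, then a fresh run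
        have hsplit : f = k.toNat + (f - k.toNat) := by omega
        rw [hsplit, gA_add, gA_near k free k.toNat (c+1) c (t+1) (fun i h1 h2 => by omega)]
        have hc1 : c + 1 + (k.toNat : Int) = c + k + 1 := by omega
        rw [hc1]
        rw [ih (f - k.toNat) (by omega) (c + k + 1) c (t + 1)
          (fun i h1 h2 => hfree i (by omega) (by push_cast at h2 ⊢; omega)) (by omega) (by omega)]
        rw [if_neg (by push_cast; omega)]
        have hf2 : ((f - k.toNat : Nat) : Int) = (f : Int) - k := by omega
        rw [hf2]
        have key : ((f : Int) + 1 - 1) / (k + 1) = ((f : Int) - k - 1) / (k + 1) + 1 := by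
          have := Int.add_mul_ediv_right ((f : Int) - k - 1) 1 (show k + 1 ≠ 0 by omega)
          rw [show (f : Int) + 1 - 1 = (f : Int) - k - 1 + 1 * (k + 1) by ring, this]
        rw [show ((k.toNat + (f - k.toNat) : Nat) : Int) = (f : Int) by omega]
        rw [key]
        simp only [Prod.mk.injEq]
        constructor <;> ring

theorem ediv_nonpos_of_nonpos (a b : Int) (h : a ≤ 0) (hb : 0 < b) : a / b ≤ 0 := by
  have h2 : a / b ≤ 0 / b := Int.ediv_le_ediv hb h
  simpa using h2

theorem gA_gaps (k n : Int) (hk : 0 ≤ k) (free : Int → Bool) (rest : List Int) :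
    ∀ (a l t : Int),
    rest.Pairwise (· < ·) →
    (∀ x ∈ rest, a < x ∧ 1 ≤ x ∧ x ≤ n) →
    (∀ i, max 1 (a + 1) ≤ i →
      free i = (decide (a + k < i) &&
        rest.all (fun x => decide (x < i - k) || decide (i + k < x)))) →
    l ≤ a → -k ≤ a →
    (gA k free ((n + 1 - max 1 (a + 1)).toNat) (max 1 (a + 1)) (l, t)).2
      = ((rest ++ [n + k + 1]).foldl
          (fun st b => (st.1 + max 0 (PySem.Int.floordiv (b - st.2 - k - 1) (k + 1)), b))
          (t, a)).1 := by
  induction rest with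
  | nil =>
    intro a l t _ _ hfree hl ha
    simp only [List.nil_append, List.foldl_cons, List.foldl_nil]
    rw [PySem.Int.floordiv_eq_ediv_of_pos (b := k + 1) (by omega)]
    set c := max 1 (a + 1) with hc
    have hc1 : 1 ≤ c := le_max_left _ _
    have hca : a + 1 ≤ c := le_max_right _ _
    have hcak : c ≤ a + k + 1 := by omega
    rcases lt_or_ge n c with hn | hn
    · -- empty scan
      rw [show (n + 1 - c).toNat = 0 by omega]
      simp only [gA]
      have : (n + k + 1 - a - k - 1) / (k + 1) ≤ 0 := by
        rcases le_or_gt (n - a) 0 with h | h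
        · exact ediv_nonpos_of_nonpos _ _ (by omega) (by omega)
        · have : n + k + 1 - a - k - 1 < k + 1 := by omega
          rw [Int.ediv_eq_zero_of_lt (by omega) this]
      omega
    · rcases le_or_gt n (a + k) with hnk | hnk
      · -- everything scanned is within k of a: nothing placed
        rw [gA_const k free _ c (l, t) ?_]
        · have : (n + k + 1 - a - k - 1) / (k + 1) ≤ 0 := by
            rcases le_or_gt (n - a) 0 with h | h
            · exact ediv_nonpos_of_nonpos _ _ (by omega) (by omega)
            · rw [Int.ediv_eq_zero_of_lt (by omega) (by omega)]
          omega
        · intro i h1 h2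
          rw [hfree i (by omega)]
          simp only [List.all_nil, Bool.and_true]
          simp only [decide_eq_false_iff_not]
          push_cast at h2
          omega
      · -- blocked [c, a+k], then one free run [a+k+1, n]
        have hsplit : (n + 1 - c).toNat = (a + k + 1 - c).toNat + (n - a - k).toNat := by omega
        rw [hsplit, gA_add, gA_const k free _ c (l, t) ?_]
        · rw [show c + ((a + k + 1 - c).toNat : Int) = a + k + 1 by omega]
          rw [gA_freeRun k hk free _ _ l t ?_ (by omega) (by omega)]
          · rw [if_neg (by push_cast; omega)]
            have key : (n + k + 1 - a - k - 1) / (k + 1) = ((n - a - k : Int) - 1) / (k + 1) + 1 := by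
              have := Int.add_mul_ediv_right (n - a - k - 1) 1 (show k + 1 ≠ 0 by omega)
              rw [show n + k + 1 - a - k - 1 = n - a - k - 1 + 1 * (k + 1) by ring, this]
            rw [show (((n - a - k).toNat : Int)) = n - a - k by omega] at *
            simp only []
            rw [key]
            have hq : 0 ≤ (n - a - k - 1) / (k + 1) :=
              Int.ediv_nonneg (by omega) (by omega)
            omega
          · intro i h1 h2
            rw [hfree i (by omega)]
            simp only [List.all_nil, Bool.and_true, decide_eq_true_eq]
            push_cast at h2
            omega
        · intro i h1 h2
          rw [hfree i (by omega)]
          simp only [List.all_nil, Bool.and_true, decide_eq_false_iff_not]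
          push_cast at h2
          omega
  | cons b rest' ih =>
    intro a l t hpw hmem hfree hl ha
    obtain ⟨hab, hb1, hbn⟩ := hmem b (by simp)
    rw [List.pairwise_cons] at hpw
    obtain ⟨hblt, hpw'⟩ := hpw
    set c := max 1 (a + 1) with hc
    have hc1 : 1 ≤ c := le_max_left _ _
    have hca : a + 1 ≤ c := le_max_right _ _
    have hcak : c ≤ a + k + 1 := by omega
    have hcb : c ≤ b + 1 := by omega
    -- RHS: peel the first gap term
    simp only [List.cons_append, List.foldl_cons]
    rw [PySem.Int.floordiv_eq_ediv_of_pos (b := k + 1) (by omega)]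
    -- free-function decomposition for the recursive call
    have hfree' : ∀ i, b + 1 ≤ i →
        free i = (decide (b + k < i) &&
          rest'.all (fun x => decide (x < i - k) || decide (i + k < x))) := by
      intro i hi
      rw [hfree i (by omega)]
      simp only [List.all_cons]
      by_cases hbk : b + k < i
      · have h1 : decide (a + k < i) = true := by simp; omega
        have h2 : decide (b < i - k) = true := by simp; omega
        have h3 : decide (b + k < i) = true := by simp; omega
        simp [h1, h2, h3]
      · have h2 : decide (b < i - k) = false := by simp; omega
        have h2' : decide (i + k < b) = false := by simp; omega
        have h3 : decide (b + k < i) = false := by simp; omega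
        simp [h2, h2', h3]
    have hmem' : ∀ x ∈ rest', b < x ∧ 1 ≤ x ∧ x ≤ n := by
      intro x hx
      exact ⟨hblt x hx, (hmem x (by simp [hx])).2⟩
    have hIH := ih b
    rw [max_eq_right (by omega : (1:Int) ≤ b + 1)] at hIH
    -- LHS: split the scan at b + 1
    have hlb : l ≤ b := by omega
    have hkb : -k ≤ b := by omega
    have hsplit : (n + 1 - c).toNat = (b + 1 - c).toNat + (n + 1 - (b + 1)).toNat := by omega
    rw [hsplit, gA_add, show c + ((b + 1 - c).toNat : Int) = b + 1 by omega]
    rcases lt_or_ge b (a + 2*k + 2) with hcase | hcase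
    · -- the gap before b admits no diner
      have hchunk : gA k free (b + 1 - c).toNat c (l, t) = (l, t) := by
        apply gA_const
        intro i h1 h2
        push_cast at h2
        rw [hfree i (by omega)]
        simp only [List.all_cons, Bool.and_eq_false_iff]
        by_cases hik : a + k < i
        · right
          have h2' : decide (b < i - k) = false := by simp; omega
          have h3 : decide (i + k < b) = false := by simp; omega
          simp [h2', h3]
        · left; simp; omega
      rw [hchunk]
      rw [show max 0 ((b - a - k - 1) / (k + 1)) = 0 by
        rcases le_or_gt (b - a - k - 1) 0 with h | h
        · have := ediv_nonpos_of_nonpos (b - a - k - 1) (k+1) (by omega) (by omega)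
          omega
        · rw [Int.ediv_eq_zero_of_lt (by omega) (by omega)]; rfl]
      rw [add_zero]
      exact hIH l t hpw' hmem' hfree' hlb hkb
    · -- blocked [c, a+k], free run [a+k+1, b-k-1], blocked [b-k, b]
      set q : Int := (b - a - 2*k - 1 - 1) / (k + 1) with hq
      have hq0 : 0 ≤ q := Int.ediv_nonneg (by omega) (by omega)
      have hqle : q * (k + 1) ≤ b - a - 2*k - 2 := by
        have h := Int.ediv_mul_le (b - a - 2*k - 1 - 1) (show (k:Int) + 1 ≠ 0 by omega)
        rw [← hq] at h
        omega
      have hlb2 : a + k + 1 + q * (k + 1) ≤ b := by omega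
      have hchunk1 : gA k free (a + k + 1 - c).toNat c (l, t) = (l, t) := by
        apply gA_const
        intro i h1 h2
        push_cast at h2
        rw [hfree i (by omega)]
        simp; omega
      have hchunk2 : gA k free (b - a - 2*k - 1).toNat (a + k + 1) (l, t) =
          (a + k + 1 + q * (k + 1), t + q + 1) := by
        rw [gA_freeRun k hk free _ (a + k + 1) l t ?_ (by omega) (by omega)]
        · rw [if_neg (by push_cast; omega)]
          rw [show (((b - a - 2*k - 1).toNat : Int)) = b - a - 2*k - 1 by omega]
        · intro i h1 h2
          push_cast at h2
          rw [hfree i (by omega)]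
          have h0 : decide (a + k < i) = true := by simp; omega
          have h3 : decide (i + k < b) = true := by simp; omega
          simp only [List.all_cons, h0, h3, Bool.or_true, Bool.true_and]
          rw [List.all_eq_true]
          intro x hx
          have := hmem' x hx
          have h4 : decide (i + k < x) = true := by simp; omega
          simp [h4]
      have hchunk3 : gA k free (k + 1).toNat (b - k) (a + k + 1 + q * (k + 1), t + q + 1) =
          (a + k + 1 + q * (k + 1), t + q + 1) := by
        apply gA_const
        intro i h1 h2
        push_cast at h2
        rw [hfree i (by omega)]
        simp only [List.all_cons, Bool.and_eq_false_iff]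
        right
        have h2' : decide (b < i - k) = false := by simp; omega
        have h3 : decide (i + k < b) = false := by simp; omega
        simp [h2', h3]
      have hsplit2 : (b + 1 - c).toNat =
          (a + k + 1 - c).toNat + ((b - a - 2*k - 1).toNat + (k + 1).toNat) := by omega
      rw [hsplit2, gA_add, gA_add, hchunk1,
        show c + ((a + k + 1 - c).toNat : Int) = a + k + 1 by omega, hchunk2,
        show a + k + 1 + ((b - a - 2*k - 1).toNat : Int) = b - k by omega, hchunk3]
      have hq' : q = (b - a - 2*k - 2) / (k + 1) := by
        rw [hq]; congr 1; ring
      have hterm : max 0 ((b - a - k - 1) / (k + 1)) = q + 1 := by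
        have := Int.add_mul_ediv_right (b - a - 2*k - 2) 1 (show k + 1 ≠ 0 by omega)
        rw [show b - a - k - 1 = b - a - 2*k - 2 + 1 * (k + 1) by ring, this, ← hq']
        omega
      rw [hterm, show t + (q + 1) = t + q + 1 by ring]
      exact hIH (a + k + 1 + q * (k + 1)) (t + q + 1) hpw' hmem' hfree' hlb2 hkb

def occL (n : Int) (s : List Int) : List Int :=
  s.filter (fun x => decide (1 ≤ x) && decide (x ≤ n))

def freeK (n k : Int) (s : List Int) (i : Int) : Bool :=
  (occL n s).all (fun x => decide (x < i - k) || decide (i + k < x))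

theorem valid_iff (n k c last : Int) (s P : List Int) (st : PySem.Set Int)
    (_hk : 0 ≤ k) (hc1 : 1 ≤ c) (hcn : c ≤ n)
    (hmem : ∀ j : Int, j ∈ st ↔ (j ∈ s ∨ j ∈ P))
    (hP : ∀ p ∈ P, 1 ≤ p ∧ p ≤ last)
    (hlastP : (P = [] ∧ last = -k) ∨ last ∈ P)
    (hlast : last ≤ c - 1) :
    solveIsValidRange n st (c - k) (c + k) = (freeK n k s c && decide (k < c - last)) := by
  rw [Bool.eq_iff_iff]
  unfold solveIsValidRange freeK occL
  rw [List.all_eq_true, Bool.and_eq_true, List.all_eq_true]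
  constructor
  · intro h
    constructor
    · intro x hx
      rw [List.mem_filter] at hx
      obtain ⟨hxs, hxb⟩ := hx
      simp only [Bool.and_eq_true, decide_eq_true_eq] at hxb
      by_contra hcon
      simp only [Bool.or_eq_true, decide_eq_true_eq, not_or] at hcon
      have hxw : x ∈ PySem.List.pyRange (max (c - k) 1) (min (c + k + 1) (n + 1)) 1 := by
        rw [PySem.List.mem_pyRange_one]
        omega
      have := h x hxw
      simp only [Bool.not_eq_eq_eq_not, Bool.not_true] at this
      rw [← Bool.not_eq_true, PySem.Set.contains_iff] at this
      exact this (hmem x |>.mpr (Or.inl hxs))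
    · simp only [decide_eq_true_eq]
      by_contra hcon
      
      rcases hlastP with ⟨hP0, hlk⟩ | hlP
      · omega
      · obtain ⟨hl1, _⟩ := hP last hlP
        have hlw : last ∈ PySem.List.pyRange (max (c - k) 1) (min (c + k + 1) (n + 1)) 1 := by
          rw [PySem.List.mem_pyRange_one]
          omega
        have := h last hlw
        simp only [Bool.not_eq_eq_eq_not, Bool.not_true] at this
        rw [← Bool.not_eq_true, PySem.Set.contains_iff] at this
        exact this (hmem last |>.mpr (Or.inr hlP))
  · rintro ⟨hocc, hlk⟩ j hj
    rw [PySem.List.mem_pyRange_one] at hj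
    simp only [decide_eq_true_eq] at hlk
    simp only [Bool.not_eq_eq_eq_not, Bool.not_true]
    rw [← Bool.not_eq_true, PySem.Set.contains_iff]
    intro hjmem
    rcases (hmem j).mp hjmem with hjs | hjP
    · have hjf : j ∈ (s.filter (fun x => decide (1 ≤ x) && decide (x ≤ n))) := by
        rw [List.mem_filter]
        refine ⟨hjs, ?_⟩
        simp only [Bool.and_eq_true, decide_eq_true_eq]
        omega
      have := hocc j hjf
      simp only [Bool.or_eq_true, decide_eq_true_eq] at this
      omega
    · have := hP j hjP
      omega

theorem loopA (n k : Int) (s : List Int) (hk : 0 ≤ k) :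
    ∀ (f : Nat) (c last cnt : Int) (P : List Int) (st : PySem.Set Int),
    f = (n + 1 - c).toNat → 1 ≤ c →
    (∀ j : Int, j ∈ st ↔ (j ∈ s ∨ j ∈ P)) →
    (∀ p ∈ P, 1 ≤ p ∧ p ≤ last) →
    ((P = [] ∧ last = -k) ∨ last ∈ P) →
    last ≤ c - 1 →
    ((PySem.List.pyRange c (n + 1) 1).foldl
      (fun st i =>
        if solveIsValidRange n st.2 (i - k) (i + k) then (st.1 + 1, PySem.Set.add st.2 i) else st)
      (cnt, st)).1 = (gA k (freeK n k s) f c (last, cnt)).2 := by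
  intro f
  induction f with
  | zero =>
    intro c last cnt P st hf hc1 _ _ _ _
    rw [PySem.List.pyRange_one_eq_nil (by omega)]
    rfl
  | succ f ih =>
    intro c last cnt P st hf hc1 hmem hP hlastP hlast
    have hcn : c ≤ n := by omega
    rw [PySem.List.pyRange_one_cons (by omega)]
    simp only [List.foldl_cons, gA]
    rw [valid_iff n k c last s P st hk hc1 hcn hmem hP hlastP hlast]
    by_cases hcond : (freeK n k s c && decide (k < c - last)) = true
    · rw [hcond]
      simp only [if_true]
      exact ih (c + 1) c (cnt + 1) (c :: P) (PySem.Set.add st c) (by omega) (by omega)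
        (fun j => by
          rw [PySem.Set.mem_add, hmem j]
          constructor
          · rintro ((h | h) | h) <;> simp [h]
          · rintro (h | h)
            · exact Or.inl (Or.inl h)
            · rcases List.mem_cons.mp h with h | h
              · exact Or.inr h
              · exact Or.inl (Or.inr h))
        (fun p hp => by
          rcases List.mem_cons.mp hp with h | h
          · omega
          · have := hP p h; omega)
        (Or.inr (by simp))
        (by omega)
    · rw [Bool.not_eq_true] at hcond
      rw [hcond]
      simp only [if_false, Bool.false_eq_true]
      exact ih (c + 1) last cnt P st (by omega) (by omega) hmem hP hlastP (by omega)

theorem solve_eq_gA (n k m : Int) (s : List Int) (hk : 0 ≤ k) :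
    solve n k m s = (gA k (freeK n k s) (n + 1 - 1).toNat 1 (-k, 0)).2 := by
  unfold solve
  exact loopA n k s hk _ 1 (-k) 0 [] (PySem.Set.ofList s) (by omega) (by omega)
    (fun j => by rw [PySem.Set.mem_ofList]; simp)
    (by simp)
    (Or.inl ⟨rfl, rfl⟩)
    (by omega)

theorem solve_spec : Claim_equal_solve := by
  unfold Claim_equal_solve
  intro n k m s _ hk
  unfold Pre_solve at hk
  unfold Spec_solve
  rw [solve_eq_gA n k m s hk]
  unfold solve_alt
  have hmax : max 1 (-k + 1) = 1 := by omega
  have hgaps := gA_gaps k n hk (freeK n k s)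
    (PySem.List.sorted (PySem.Set.ofList (occL n s)) (fun x => x) false)
    (-k) (-k) 0
    (PySem.List.sorted_ofList_pairwise_lt (occL n s))
    (fun x hx => by
      rw [PySem.List.mem_sorted, PySem.Set.mem_ofList] at hx
      unfold occL at hx
      rw [List.mem_filter] at hx
      simp only [Bool.and_eq_true, decide_eq_true_eq] at hx
      omega)
    (fun i hi => by
      rw [hmax] at hi
      unfold freeK
      rw [Bool.eq_iff_iff, Bool.and_eq_true, List.all_eq_true, List.all_eq_true]
      constructor
      · intro h
        refine ⟨by simp; omega, fun x hx => ?_⟩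
        rw [PySem.List.mem_sorted, PySem.Set.mem_ofList] at hx
        exact h x hx
      · rintro ⟨_, h⟩ x hx
        exact h x (by rw [PySem.List.mem_sorted, PySem.Set.mem_ofList]; exact hx))
    le_rfl le_rfl
  rw [hmax] at hgaps
  exact hgaps
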